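-- pv_equiv track=rewrite | github.com/Awalker17/CS4720_02 | Homework2/Functions.py | checkWordisSame
-- ===== SOURCE A (Python) =====
-- def checkWordisSame(String1, String2, index):
--     check = True
--     newIndex = 0
--     for i in range(index):
--         if String1[i] != String2[i]:
--             newIndex = i
--             check = False
--     return check, newIndex
-- ===== SOURCE B (Python) =====
-- def checkWordisSame(String1, String2, index):
--     for i in range(index - 1, -1, -1):
--         if String1[i] != String2[i]:
--             return False, i
--     return True, 0
-- ===== Notes on version B (the rewrite author's own statement) =====
-- stated objective: alternative
-- what changed: B scans backwards from index-1 and returns immediately at the first mismatch it meets (the last mismatch position), instead of A's forward scan that keeps overwriting the mismatch index to the end.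
import Mathlib
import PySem

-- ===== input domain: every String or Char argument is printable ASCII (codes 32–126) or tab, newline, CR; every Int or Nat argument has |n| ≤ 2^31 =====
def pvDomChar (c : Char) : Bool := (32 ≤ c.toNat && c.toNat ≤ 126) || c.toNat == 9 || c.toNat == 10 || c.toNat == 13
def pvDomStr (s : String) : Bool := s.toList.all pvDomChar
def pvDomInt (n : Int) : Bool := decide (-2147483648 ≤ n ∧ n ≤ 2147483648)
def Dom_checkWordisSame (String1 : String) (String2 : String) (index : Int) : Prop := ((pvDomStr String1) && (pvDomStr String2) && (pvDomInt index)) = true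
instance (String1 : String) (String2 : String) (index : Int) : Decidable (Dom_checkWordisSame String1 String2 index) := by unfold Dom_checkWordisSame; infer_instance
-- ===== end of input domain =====

-- B replaces A's forward scan (which overwrites the mismatch index until the end) by a backward
-- scan from index-1 that returns at the first mismatch it meets (alternative decomposition, same cost).


-- ===== PORT A =====
-- forward loop over range(index); state (check, newIndex); out-of-range access is only
-- reached outside Pre_, where pyGet? returns none (IndexError in Python)
def checkWordisSame (String1 : String) (String2 : String) (index : Int) : Bool × Int :=
  (PySem.List.pyRange 0 index 1).foldl
    (fun st i =>
      if PySem.Str.pyGet? String1 i ≠ PySem.Str.pyGet? String2 i then (false, i) else st)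
    (true, 0)

-- ===== PORT B =====
-- backward loop: check position n-1 first, return immediately on mismatch
def checkWordisSame_alt_go (String1 : String) (String2 : String) : Nat → Bool × Int
  | 0 => (true, 0)
  | n + 1 =>
    if PySem.Str.pyGet? String1 (n : Int) ≠ PySem.Str.pyGet? String2 (n : Int) then
      (false, (n : Int))
    else
      checkWordisSame_alt_go String1 String2 n

def checkWordisSame_alt (String1 : String) (String2 : String) (index : Int) : Bool × Int :=
  checkWordisSame_alt_go String1 String2 index.toNat

-- ===== PRECONDITION & SPEC =====
-- Pre_ excludes exactly the inputs where Python A raises IndexError: index exceeding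
-- the length of either string (both A and B raise there).
def Pre_checkWordisSame (String1 : String) (String2 : String) (index : Int) : Prop :=
  index ≤ (String1.toList.length : Int) ∧ index ≤ (String2.toList.length : Int)
instance (String1 : String) (String2 : String) (index : Int) : Decidable (Pre_checkWordisSame String1 String2 index) := by unfold Pre_checkWordisSame; infer_instance
def pvWitness_checkWordisSame : String × String × Int := ("abc", "axc", 3)

def Spec_checkWordisSame (String1 : String) (String2 : String) (index : Int) (out : Bool × Int) : Prop := out = checkWordisSame_alt String1 String2 index
instance (String1 : String) (String2 : String) (index : Int) (out : Bool × Int) : Decidable (Spec_checkWordisSame String1 String2 index out) := by unfold Spec_checkWordisSame; infer_instance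

-- ===== CLAIM (what is proved, stated in full; the proofs are below) =====
def Claim_equal_checkWordisSame : Prop := ∀ (String1 : String) (String2 : String) (index : Int), Dom_checkWordisSame String1 String2 index → Pre_checkWordisSame String1 String2 index → Spec_checkWordisSame String1 String2 index (checkWordisSame String1 String2 index)

-- ===== LEMMAS AND PROOFS =====

theorem altGo_true (S1 S2 : String) (n : Nat)
    (h : (checkWordisSame_alt_go S1 S2 n).1 = true) :
    checkWordisSame_alt_go S1 S2 n = (true, 0) := by
  induction n with
  | zero => rfl
  | succ n ih =>
    unfold checkWordisSame_alt_go at h ⊢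
    split at h
    · simp at h
    · simp_all

theorem foldl_eq_altGo (S1 S2 : String) (n : Nat) (st : Bool × Int) :
    (PySem.List.pyRange 0 (n : Int) 1).foldl
      (fun st i =>
        if PySem.Str.pyGet? S1 i ≠ PySem.Str.pyGet? S2 i then (false, i) else st) st
    = (if (checkWordisSame_alt_go S1 S2 n).1 then st else checkWordisSame_alt_go S1 S2 n) := by
  induction n generalizing st with
  | zero => simp [PySem.List.pyRange_one_eq_nil, checkWordisSame_alt_go]
  | succ n ih =>
    have h : ((n : Int) + 1) = ((n + 1 : Nat) : Int) := by push_cast; ring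
    rw [← h, PySem.List.pyRange_one_succ_right (by positivity)]
    rw [List.foldl_append, ih]
    by_cases hm : PySem.Str.pyGet? S1 (n : Int) = PySem.Str.pyGet? S2 (n : Int)
    · simp only [List.foldl_cons, List.foldl_nil]
      rw [if_neg (by simpa using hm)]
      have he : checkWordisSame_alt_go S1 S2 (n + 1) = checkWordisSame_alt_go S1 S2 n := by
        rw [checkWordisSame_alt_go]; rw [if_neg (by simpa using hm)]
      rw [he]
    · simp only [List.foldl_cons, List.foldl_nil]
      rw [if_pos (by simpa using hm)]
      have he : checkWordisSame_alt_go S1 S2 (n + 1) = (false, (n : Int)) := by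
        rw [checkWordisSame_alt_go]; rw [if_pos (by simpa using hm)]
      rw [he]
      simp

-- ===== VERDICT (by name: the statement is the Claim_ definition above) =====
theorem checkWordisSame_spec : Claim_equal_checkWordisSame := by
  intro S1 S2 index _ hpre
  unfold Spec_checkWordisSame checkWordisSame checkWordisSame_alt
  rcases le_or_gt index 0 with hle | hgt
  · rw [PySem.List.pyRange_one_eq_nil hle]
    have : index.toNat = 0 := Int.toNat_of_nonpos hle
    simp [this, checkWordisSame_alt_go]
  · have hc : (PySem.List.pyRange 0 index 1) = PySem.List.pyRange 0 (index.toNat : Int) 1 := by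
      rw [Int.toNat_of_nonneg (le_of_lt hgt)]
    rw [hc, foldl_eq_altGo]
    by_cases h : (checkWordisSame_alt_go S1 S2 index.toNat).1 = true
    · rw [if_pos h, altGo_true S1 S2 _ h]
    · rw [if_neg h]
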